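-- pv_equiv track=rewrite | github.com/koii-network/prometheus-beta | src/football_match.py | determine_football_match_winner
-- ===== SOURCE A (Python) =====
-- def determine_football_match_winner(team1_players, team2_players, team1_goals, team2_goals):
--     """
--     Determine the winner of a football match based on goals and player count.
--
--     Args:
--         team1_players (int): Number of players on team 1
--         team2_players (int): Number of players on team 2
--         team1_goals (int): Number of goals scored by team 1
--         team2_goals (int): Number of goals scored by team 2
--
--     Returns:
--         str: Winner of the match ('Team 1', 'Team 2', 'Draw')
--
--     Raises:
--         ValueError: If any input is negative or not an integer
--     """
--     # Validate inputs
--     if not all(isinstance(x, int) for x in [team1_players, team2_players, team1_goals, team2_goals]):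
--         raise ValueError("All inputs must be integers")
--
--     if any(x < 0 for x in [team1_players, team2_players, team1_goals, team2_goals]):
--         raise ValueError("Inputs cannot be negative")
--
--     # Check special conditions based on goals and players
--     if team1_goals > team2_goals:
--         return 'Team 1'
--     elif team2_goals > team1_goals:
--         return 'Team 2'
--
--     # If goals are equal, use player count as a tiebreaker
--     if team1_players > team2_players:
--         return 'Team 1'
--     elif team2_players > team1_players:
--         return 'Team 2'
--
--     # If both goals and players are equal, it's a draw
--     return 'Draw'
-- ===== SOURCE B (Python) =====
-- def determine_football_match_winner(team1_players, team2_players, team1_goals, team2_goals):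
--     values = [team1_players, team2_players, team1_goals, team2_goals]
--     if not all(isinstance(x, int) for x in values):
--         raise ValueError("All inputs must be integers")
--     if any(x < 0 for x in values):
--         raise ValueError("Inputs cannot be negative")
--     # Record-based: build a table of team scorelines and select the maximal one;
--     # a draw is exactly when both records are identical.
--     records = {'Team 1': (team1_goals, team1_players), 'Team 2': (team2_goals, team2_players)}
--     if records['Team 1'] == records['Team 2']:
--         return 'Draw'
--     return max(records, key=records.get)
-- ===== Notes on version B (the rewrite author's own statement) =====
-- stated objective: alternative
-- what changed: Replaces A's two sequential if/elif comparison cascades by a table of per-team (goals, players) records: a draw iff the records are identical, otherwise the winner is selected with max over the table keyed by the record.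
import Mathlib
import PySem

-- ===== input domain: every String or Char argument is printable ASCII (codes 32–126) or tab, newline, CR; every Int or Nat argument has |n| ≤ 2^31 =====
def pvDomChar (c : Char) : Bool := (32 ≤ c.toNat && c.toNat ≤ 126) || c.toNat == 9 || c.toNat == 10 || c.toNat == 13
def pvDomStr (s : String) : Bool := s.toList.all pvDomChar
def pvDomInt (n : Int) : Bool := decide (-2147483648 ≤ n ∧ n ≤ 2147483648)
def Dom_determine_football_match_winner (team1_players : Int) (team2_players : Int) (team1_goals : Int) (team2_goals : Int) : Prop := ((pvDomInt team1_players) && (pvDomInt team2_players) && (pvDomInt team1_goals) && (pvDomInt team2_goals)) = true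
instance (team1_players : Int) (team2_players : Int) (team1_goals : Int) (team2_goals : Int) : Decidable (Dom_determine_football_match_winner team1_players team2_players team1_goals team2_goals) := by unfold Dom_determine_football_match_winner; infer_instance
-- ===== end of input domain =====

-- ===== PORT A =====
-- B keeps A's validation but decides via a table of per-team (goals, players) records
-- (draw iff identical, else max by record) instead of A's two if/elif cascades (objective: alternative).
def determine_football_match_winner (team1_players : Int) (team2_players : Int) (team1_goals : Int) (team2_goals : Int) : String :=
  if team1_goals > team2_goals then "Team 1"
  else if team2_goals > team1_goals then "Team 2"
  else if team1_players > team2_players then "Team 1"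
  else if team2_players > team1_players then "Team 2"
  else "Draw"

-- ===== PORT B =====
-- Python tuple comparison is lexicographic; ported explicitly (Lean's Prod.lt is componentwise, not Python's).
def pvTupLt (a b : Int × Int) : Bool := a.1 < b.1 || (a.1 == b.1 && a.2 < b.2)

-- max(records, key=records.get): fold over the remaining entries keeping the first maximal one.
def determine_football_match_winner_alt (team1_players : Int) (team2_players : Int) (team1_goals : Int) (team2_goals : Int) : String :=
  let records : List (String × (Int × Int)) :=
    [("Team 1", (team1_goals, team1_players)), ("Team 2", (team2_goals, team2_players))]
  if (team1_goals, team1_players) = (team2_goals, team2_players) then "Draw"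
  else
    match records with
    | [] => ""  -- unreachable: records has two entries
    | h :: t => (t.foldl (fun best kv => if pvTupLt best.2 kv.2 then kv else best) h).1

-- ===== PRECONDITION & SPEC =====
-- A (and B) raise ValueError when any argument is negative; Pre_ excludes exactly those inputs.
def Pre_determine_football_match_winner (team1_players : Int) (team2_players : Int) (team1_goals : Int) (team2_goals : Int) : Prop :=
  0 ≤ team1_players ∧ 0 ≤ team2_players ∧ 0 ≤ team1_goals ∧ 0 ≤ team2_goals
instance (team1_players : Int) (team2_players : Int) (team1_goals : Int) (team2_goals : Int) : Decidable (Pre_determine_football_match_winner team1_players team2_players team1_goals team2_goals) := by unfold Pre_determine_football_match_winner; infer_instance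
def pvWitness_determine_football_match_winner : Int × Int × Int × Int := (11, 10, 2, 2)
def Spec_determine_football_match_winner (team1_players : Int) (team2_players : Int) (team1_goals : Int) (team2_goals : Int) (out : String) : Prop := out = determine_football_match_winner_alt team1_players team2_players team1_goals team2_goals
instance (team1_players : Int) (team2_players : Int) (team1_goals : Int) (team2_goals : Int) (out : String) : Decidable (Spec_determine_football_match_winner team1_players team2_players team1_goals team2_goals out) := by unfold Spec_determine_football_match_winner; infer_instance

-- ===== CLAIM =====
def Claim_equal_determine_football_match_winner : Prop := ∀ (team1_players : Int) (team2_players : Int) (team1_goals : Int) (team2_goals : Int), Dom_determine_football_match_winner team1_players team2_players team1_goals team2_goals → Pre_determine_football_match_winner team1_players team2_players team1_goals team2_goals → Spec_determine_football_match_winner team1_players team2_players team1_goals team2_goals (determine_football_match_winner team1_players team2_players team1_goals team2_goals)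

-- ===== LEMMAS AND PROOFS =====

-- ===== VERDICT =====
theorem determine_football_match_winner_spec : Claim_equal_determine_football_match_winner := by
  intro p1 p2 g1 g2 _ _
  unfold Spec_determine_football_match_winner determine_football_match_winner determine_football_match_winner_alt
  simp only [List.foldl, pvTupLt, Prod.mk.injEq, decide_eq_true_eq, Bool.or_eq_true,
    Bool.and_eq_true, beq_iff_eq]
  split_ifs <;> first | rfl | omega
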